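-- pv_equiv track=rewrite | github.com/Deepansh-Umar/zeroplast | hackcheck/utils.py | estimate_impacts
-- ===== SOURCE A (Python) =====
-- def estimate_impacts(items: dict) -> dict:
--     """
--     Estimate environmental impacts of plastic usage.
--     items = { "bottle": 3, "bag": 5 }
--     Returns dict with CO2 saved, plastic saved, etc.
--     """
--     # rough example factors (made up for prototype!)
--     impact_factors = {
--         "bottle": {"plastic_g": 20, "co2_g": 50},
--         "bag": {"plastic_g": 10, "co2_g": 20},
--         "cup": {"plastic_g": 15, "co2_g": 40},
--         "straw": {"plastic_g": 5, "co2_g": 10},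
--     }
--
--     total = {"plastic_g": 0, "co2_g": 0}
--     for item, qty in items.items():
--         factor = impact_factors.get(item.lower())
--         if factor:
--             total["plastic_g"] += factor["plastic_g"] * qty
--             total["co2_g"] += factor["co2_g"] * qty
--
--     return total
-- ===== SOURCE B (Python) =====
-- def estimate_impacts(items: dict) -> dict:
--     # Pass 1: normalize quantities under lowercased keys, summing case variants.
--     normalized = {}
--     for item, qty in items.items():
--         key = item.lower()
--         normalized[key] = normalized.get(key, 0) + qty
--     # Pass 2: walk the fixed factor table instead of the input.
--     impact_factors = {
--         "bottle": {"plastic_g": 20, "co2_g": 50},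
--         "bag": {"plastic_g": 10, "co2_g": 20},
--         "cup": {"plastic_g": 15, "co2_g": 40},
--         "straw": {"plastic_g": 5, "co2_g": 10},
--     }
--     total = {"plastic_g": 0, "co2_g": 0}
--     for key, factor in impact_factors.items():
--         qty = normalized.get(key, 0)
--         total["plastic_g"] += factor["plastic_g"] * qty
--         total["co2_g"] += factor["co2_g"] * qty
--     return total
-- ===== Notes on version B (the rewrite author's own statement) =====
-- stated objective: alternative
-- what changed: Instead of accumulating totals while scanning the input with a per-item table lookup, B first folds the input into a normalized lowercase-keyed quantity dict and then computes the totals by a second pass over the fixed 4-entry factor table.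
import Mathlib
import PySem

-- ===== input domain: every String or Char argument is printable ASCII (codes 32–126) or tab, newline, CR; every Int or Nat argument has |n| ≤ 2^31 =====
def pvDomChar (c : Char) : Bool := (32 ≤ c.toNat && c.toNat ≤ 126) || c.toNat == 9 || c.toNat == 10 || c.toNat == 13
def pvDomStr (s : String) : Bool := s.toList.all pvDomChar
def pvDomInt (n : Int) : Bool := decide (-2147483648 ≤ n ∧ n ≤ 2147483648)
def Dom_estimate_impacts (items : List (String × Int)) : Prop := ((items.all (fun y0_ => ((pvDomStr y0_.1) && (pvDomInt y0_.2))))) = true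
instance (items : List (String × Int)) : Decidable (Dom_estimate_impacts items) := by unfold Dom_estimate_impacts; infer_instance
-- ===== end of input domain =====

-- B replaces A's single accumulate-while-scanning loop by two differently-shaped passes:
-- first fold the input into a lowercase-keyed normalized quantity dict, then total by a
-- pass over the fixed factor table (objective: alternative decomposition, same cost).

-- ===== PORT A =====
-- the fixed impact_factors table of A
def pvFactorsA : PySem.Dict String (PySem.Dict String Int) :=
  PySem.Dict.ofList [("bottle", PySem.Dict.ofList [("plastic_g", 20), ("co2_g", 50)]),
                     ("bag",    PySem.Dict.ofList [("plastic_g", 10), ("co2_g", 20)]),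
                     ("cup",    PySem.Dict.ofList [("plastic_g", 15), ("co2_g", 40)]),
                     ("straw",  PySem.Dict.ofList [("plastic_g", 5),  ("co2_g", 10)])]

-- A's loop: for item, qty in items.items(): factor = impact_factors.get(item.lower()); if factor: …
-- (the table's inner dicts always contain both keys, so factor["plastic_g"] is getD … 0)
def pvLoopA (total : PySem.Dict String Int) : List (String × Int) → PySem.Dict String Int
  | [] => total
  | iq :: rest =>
    match pvFactorsA.get? (PySem.Str.lower iq.1) with
    | some factor =>
      if factor.size ≠ 0 then   -- Python truthiness of the dict `factor`
        let t1 := total.insert "plastic_g" (total.getD "plastic_g" 0 + factor.getD "plastic_g" 0 * iq.2)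
        let t2 := t1.insert "co2_g" (t1.getD "co2_g" 0 + factor.getD "co2_g" 0 * iq.2)
        pvLoopA t2 rest
      else pvLoopA total rest
    | none => pvLoopA total rest

def estimate_impacts (items : List (String × Int)) : List (String × Int) :=
  (pvLoopA (PySem.Dict.ofList [("plastic_g", 0), ("co2_g", 0)]) items).items

-- ===== PORT B =====
-- B pass 1: normalized[key] = normalized.get(key, 0) + qty with key = item.lower()
def pvNormLoop (normalized : PySem.Dict String Int) : List (String × Int) → PySem.Dict String Int
  | [] => normalized
  | iq :: rest =>
    let key := PySem.Str.lower iq.1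
    pvNormLoop (normalized.insert key (normalized.getD key 0 + iq.2)) rest

def estimate_impacts_alt (items : List (String × Int)) : List (String × Int) :=
  let normalized := pvNormLoop PySem.Dict.empty items
  -- B's fixed impact_factors table (a local of Source B)
  let impact_factors : PySem.Dict String (PySem.Dict String Int) :=
    PySem.Dict.ofList [("bottle", PySem.Dict.ofList [("plastic_g", 20), ("co2_g", 50)]),
                       ("bag",    PySem.Dict.ofList [("plastic_g", 10), ("co2_g", 20)]),
                       ("cup",    PySem.Dict.ofList [("plastic_g", 15), ("co2_g", 40)]),
                       ("straw",  PySem.Dict.ofList [("plastic_g", 5),  ("co2_g", 10)])]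
  -- B pass 2: for key, factor in impact_factors.items(): total[…] += factor[…] * normalized.get(key, 0)
  let total := impact_factors.items.foldl
    (fun (total : PySem.Dict String Int) kf =>
      let qty := normalized.getD kf.1 0
      let t1 := total.insert "plastic_g" (total.getD "plastic_g" 0 + kf.2.getD "plastic_g" 0 * qty)
      t1.insert "co2_g" (t1.getD "co2_g" 0 + kf.2.getD "co2_g" 0 * qty))
    (PySem.Dict.ofList [("plastic_g", 0), ("co2_g", 0)])
  total.items

-- ===== PRECONDITION & SPEC =====
def Spec_estimate_impacts (items : List (String × Int)) (out : List (String × Int)) : Prop := out = estimate_impacts_alt items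
instance (items : List (String × Int)) (out : List (String × Int)) : Decidable (Spec_estimate_impacts items out) := by unfold Spec_estimate_impacts; infer_instance

-- ===== CLAIM (what is proved, stated in full; the proofs are below) =====
def Claim_equal_estimate_impacts : Prop := ∀ (items : List (String × Int)), Dom_estimate_impacts items → Spec_estimate_impacts items (estimate_impacts items)

-- ===== LEMMAS AND PROOFS =====

-- per-item plastic/CO2 factors of A's lookup, as plain if-chains
def pvFP (s : String) : Int := if s = "bottle" then 20 else if s = "bag" then 10 else if s = "cup" then 15 else if s = "straw" then 5 else 0
def pvFC (s : String) : Int := if s = "bottle" then 50 else if s = "bag" then 20 else if s = "cup" then 40 else if s = "straw" then 10 else 0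

-- total quantity of items whose lowercased name is k
def pvQ (k : String) (items : List (String × Int)) : Int :=
  (items.map (fun iq => if PySem.Str.lower iq.1 = k then iq.2 else 0)).sum

def pvSP (items : List (String × Int)) : Int := (items.map (fun iq => pvFP (PySem.Str.lower iq.1) * iq.2)).sum
def pvSC (items : List (String × Int)) : Int := (items.map (fun iq => pvFC (PySem.Str.lower iq.1) * iq.2)).sum

lemma pvQ_cons (k : String) (iq : String × Int) (rest : List (String × Int)) :
    pvQ k (iq :: rest) = (if PySem.Str.lower iq.1 = k then iq.2 else 0) + pvQ k rest := by
  simp [pvQ]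

lemma pvSP_cons (iq : String × Int) (rest : List (String × Int)) :
    pvSP (iq :: rest) = pvFP (PySem.Str.lower iq.1) * iq.2 + pvSP rest := by simp [pvSP]

lemma pvSC_cons (iq : String × Int) (rest : List (String × Int)) :
    pvSC (iq :: rest) = pvFC (PySem.Str.lower iq.1) * iq.2 + pvSC rest := by simp [pvSC]

lemma pvMk2_eq {a b c d : Int} (h1 : a = c) (h2 : b = d) :
    PySem.Dict.mk [("plastic_g", a), ("co2_g", b)] = PySem.Dict.mk [("plastic_g", c), ("co2_g", d)] := by
  rw [h1, h2]

lemma pvFactorsA_get? (s : String) :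
    pvFactorsA.get? s =
      if s = "bottle" then some (PySem.Dict.mk [("plastic_g", 20), ("co2_g", 50)])
      else if s = "bag" then some (PySem.Dict.mk [("plastic_g", 10), ("co2_g", 20)])
      else if s = "cup" then some (PySem.Dict.mk [("plastic_g", 15), ("co2_g", 40)])
      else if s = "straw" then some (PySem.Dict.mk [("plastic_g", 5), ("co2_g", 10)])
      else none := by
  have h : pvFactorsA = PySem.Dict.mk
      [("bottle", PySem.Dict.mk [("plastic_g", 20), ("co2_g", 50)]),
       ("bag",    PySem.Dict.mk [("plastic_g", 10), ("co2_g", 20)]),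
       ("cup",    PySem.Dict.mk [("plastic_g", 15), ("co2_g", 40)]),
       ("straw",  PySem.Dict.mk [("plastic_g", 5),  ("co2_g", 10)])] := by decide
  rw [h]
  by_cases h1 : s = "bottle"
  · subst h1; decide
  by_cases h2 : s = "bag"
  · subst h2; decide
  by_cases h3 : s = "cup"
  · subst h3; decide
  by_cases h4 : s = "straw"
  · subst h4; decide
  have h1' : ¬ ("bottle" = s) := fun e => h1 e.symm
  have h2' : ¬ ("bag" = s) := fun e => h2 e.symm
  have h3' : ¬ ("cup" = s) := fun e => h3 e.symm
  have h4' : ¬ ("straw" = s) := fun e => h4 e.symm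
  simp only [PySem.Dict.get?_mk_cons, beq_iff_eq, if_neg h1', if_neg h2', if_neg h3', if_neg h4',
    if_neg h1, if_neg h2, if_neg h3, if_neg h4]
  rfl

lemma pvInsert2P (p c v : Int) :
    (PySem.Dict.mk [("plastic_g", p), ("co2_g", c)]).insert "plastic_g" v
      = PySem.Dict.mk [("plastic_g", v), ("co2_g", c)] := by
  apply PySem.Dict.ext
  simp [PySem.Dict.items_insert]

lemma pvInsert2C (p c v : Int) :
    (PySem.Dict.mk [("plastic_g", p), ("co2_g", c)]).insert "co2_g" v
      = PySem.Dict.mk [("plastic_g", p), ("co2_g", v)] := by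
  apply PySem.Dict.ext
  simp [PySem.Dict.items_insert]

lemma pvGetD2P (p c : Int) : (PySem.Dict.mk [("plastic_g", p), ("co2_g", c)]).getD "plastic_g" 0 = p := by
  simp [PySem.Dict.getD_eq_get?_getD, PySem.Dict.get?_mk_cons]

lemma pvGetD2C (p c : Int) : (PySem.Dict.mk [("plastic_g", p), ("co2_g", c)]).getD "co2_g" 0 = c := by
  simp [PySem.Dict.getD_eq_get?_getD, PySem.Dict.get?]

lemma pvLoopA_char (items : List (String × Int)) : ∀ p c : Int,
    pvLoopA (PySem.Dict.mk [("plastic_g", p), ("co2_g", c)]) items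
      = PySem.Dict.mk [("plastic_g", p + pvSP items), ("co2_g", c + pvSC items)] := by
  induction items with
  | nil => intro p c; simp [pvLoopA, pvSP, pvSC]
  | cons iq rest ih =>
    intro p c
    rw [pvLoopA, pvFactorsA_get?, pvSP_cons, pvSC_cons]
    split_ifs with h1 h2 h3 h4
    · simp only [reduceCtorEq, ↓reduceIte, PySem.Dict.size, List.length_cons, List.length_nil,
        ne_eq, not_false_eq_true, pvInsert2P, pvGetD2P, pvGetD2C, pvInsert2C]
      rw [ih, show pvFP (PySem.Str.lower iq.1) = 20 from by simp [pvFP, h1],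
          show pvFC (PySem.Str.lower iq.1) = 50 from by simp [pvFC, h1]]
      exact pvMk2_eq (by ring) (by ring)
    · simp only [reduceCtorEq, ↓reduceIte, PySem.Dict.size, List.length_cons, List.length_nil,
        ne_eq, not_false_eq_true, pvInsert2P, pvGetD2P, pvGetD2C, pvInsert2C]
      rw [ih, show pvFP (PySem.Str.lower iq.1) = 10 from by simp [pvFP, h2],
          show pvFC (PySem.Str.lower iq.1) = 20 from by simp [pvFC, h2]]
      exact pvMk2_eq (by ring) (by ring)
    · simp only [reduceCtorEq, ↓reduceIte, PySem.Dict.size, List.length_cons, List.length_nil,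
        ne_eq, not_false_eq_true, pvInsert2P, pvGetD2P, pvGetD2C, pvInsert2C]
      rw [ih, show pvFP (PySem.Str.lower iq.1) = 15 from by simp [pvFP, h3],
          show pvFC (PySem.Str.lower iq.1) = 40 from by simp [pvFC, h3]]
      exact pvMk2_eq (by ring) (by ring)
    · simp only [reduceCtorEq, ↓reduceIte, PySem.Dict.size, List.length_cons, List.length_nil,
        ne_eq, not_false_eq_true, pvInsert2P, pvGetD2P, pvGetD2C, pvInsert2C]
      rw [ih, show pvFP (PySem.Str.lower iq.1) = 5 from by simp [pvFP, h4],
          show pvFC (PySem.Str.lower iq.1) = 10 from by simp [pvFC, h4]]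
      exact pvMk2_eq (by ring) (by ring)
    · rw [ih, show pvFP (PySem.Str.lower iq.1) = 0 from by simp [pvFP, h1, h2, h3, h4],
          show pvFC (PySem.Str.lower iq.1) = 0 from by simp [pvFC, h1, h2, h3, h4]]
      exact pvMk2_eq (by ring) (by ring)

lemma pvA_char (items : List (String × Int)) :
    estimate_impacts items = [("plastic_g", pvSP items), ("co2_g", pvSC items)] := by
  have h0 : PySem.Dict.ofList [("plastic_g", (0:Int)), ("co2_g", (0:Int))]
      = PySem.Dict.mk [("plastic_g", 0), ("co2_g", 0)] := by decide
  rw [estimate_impacts, h0, pvLoopA_char]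
  simp

lemma pvNormLoop_getD (items : List (String × Int)) : ∀ (d : PySem.Dict String Int) (k : String),
    (pvNormLoop d items).getD k 0 = d.getD k 0 + pvQ k items := by
  induction items with
  | nil => intro d k; simp [pvNormLoop, pvQ]
  | cons iq rest ih =>
    intro d k
    rw [pvNormLoop]
    rw [ih, PySem.Dict.getD_insert, pvQ_cons]
    by_cases h : k = PySem.Str.lower iq.1
    · rw [if_pos h, if_pos h.symm, h]; ring
    · rw [if_neg h, if_neg (fun e => h e.symm)]; ring

lemma pvB_char (items : List (String × Int)) :
    estimate_impacts_alt items =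
      [("plastic_g", 20 * pvQ "bottle" items + 10 * pvQ "bag" items + 15 * pvQ "cup" items + 5 * pvQ "straw" items),
       ("co2_g", 50 * pvQ "bottle" items + 20 * pvQ "bag" items + 40 * pvQ "cup" items + 10 * pvQ "straw" items)] := by
  have hB : (PySem.Dict.ofList [("bottle", PySem.Dict.ofList [("plastic_g", 20), ("co2_g", 50)]),
                       ("bag",    PySem.Dict.ofList [("plastic_g", 10), ("co2_g", 20)]),
                       ("cup",    PySem.Dict.ofList [("plastic_g", 15), ("co2_g", 40)]),
                       ("straw",  PySem.Dict.ofList [("plastic_g", 5),  ("co2_g", 10)])] :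
              PySem.Dict String (PySem.Dict String Int)).items =
      [("bottle", PySem.Dict.mk [("plastic_g", 20), ("co2_g", 50)]),
       ("bag",    PySem.Dict.mk [("plastic_g", 10), ("co2_g", 20)]),
       ("cup",    PySem.Dict.mk [("plastic_g", 15), ("co2_g", 40)]),
       ("straw",  PySem.Dict.mk [("plastic_g", 5),  ("co2_g", 10)])] := by decide
  have h0 : PySem.Dict.ofList [("plastic_g", (0:Int)), ("co2_g", (0:Int))]
      = PySem.Dict.mk [("plastic_g", 0), ("co2_g", 0)] := by decide
  have hn : ∀ k, (pvNormLoop PySem.Dict.empty items).getD k 0 = pvQ k items := by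
    intro k; rw [pvNormLoop_getD]; simp [PySem.Dict.getD_empty]
  rw [estimate_impacts_alt]
  simp only [hB, h0, List.foldl, pvInsert2P, pvInsert2C, pvGetD2P, pvGetD2C, hn]
  simp only [zero_add]

lemma pvSP_decomp (items : List (String × Int)) :
    pvSP items = 20 * pvQ "bottle" items + 10 * pvQ "bag" items + 15 * pvQ "cup" items + 5 * pvQ "straw" items := by
  induction items with
  | nil => simp [pvSP, pvQ]
  | cons iq rest ih =>
    rw [pvSP_cons, ih, pvQ_cons, pvQ_cons, pvQ_cons, pvQ_cons]
    by_cases h1 : PySem.Str.lower iq.1 = "bottle"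
    · rw [if_pos h1, if_neg (by rw [h1]; decide), if_neg (by rw [h1]; decide),
          if_neg (by rw [h1]; decide), show pvFP (PySem.Str.lower iq.1) = 20 from by simp [pvFP, h1]]
      ring
    by_cases h2 : PySem.Str.lower iq.1 = "bag"
    · rw [if_neg h1, if_pos h2, if_neg (by rw [h2]; decide), if_neg (by rw [h2]; decide),
          show pvFP (PySem.Str.lower iq.1) = 10 from by simp [pvFP, h2]]
      ring
    by_cases h3 : PySem.Str.lower iq.1 = "cup"
    · rw [if_neg h1, if_neg h2, if_pos h3, if_neg (by rw [h3]; decide),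
          show pvFP (PySem.Str.lower iq.1) = 15 from by simp [pvFP, h3]]
      ring
    by_cases h4 : PySem.Str.lower iq.1 = "straw"
    · rw [if_neg h1, if_neg h2, if_neg h3, if_pos h4,
          show pvFP (PySem.Str.lower iq.1) = 5 from by simp [pvFP, h4]]
      ring
    · rw [if_neg h1, if_neg h2, if_neg h3, if_neg h4,
          show pvFP (PySem.Str.lower iq.1) = 0 from by simp [pvFP, h1, h2, h3, h4]]
      ring

lemma pvSC_decomp (items : List (String × Int)) :
    pvSC items = 50 * pvQ "bottle" items + 20 * pvQ "bag" items + 40 * pvQ "cup" items + 10 * pvQ "straw" items := by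
  induction items with
  | nil => simp [pvSC, pvQ]
  | cons iq rest ih =>
    rw [pvSC_cons, ih, pvQ_cons, pvQ_cons, pvQ_cons, pvQ_cons]
    by_cases h1 : PySem.Str.lower iq.1 = "bottle"
    · rw [if_pos h1, if_neg (by rw [h1]; decide), if_neg (by rw [h1]; decide),
          if_neg (by rw [h1]; decide), show pvFC (PySem.Str.lower iq.1) = 50 from by simp [pvFC, h1]]
      ring
    by_cases h2 : PySem.Str.lower iq.1 = "bag"
    · rw [if_neg h1, if_pos h2, if_neg (by rw [h2]; decide), if_neg (by rw [h2]; decide),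
          show pvFC (PySem.Str.lower iq.1) = 20 from by simp [pvFC, h2]]
      ring
    by_cases h3 : PySem.Str.lower iq.1 = "cup"
    · rw [if_neg h1, if_neg h2, if_pos h3, if_neg (by rw [h3]; decide),
          show pvFC (PySem.Str.lower iq.1) = 40 from by simp [pvFC, h3]]
      ring
    by_cases h4 : PySem.Str.lower iq.1 = "straw"
    · rw [if_neg h1, if_neg h2, if_neg h3, if_pos h4,
          show pvFC (PySem.Str.lower iq.1) = 10 from by simp [pvFC, h4]]
      ring
    · rw [if_neg h1, if_neg h2, if_neg h3, if_neg h4,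
          show pvFC (PySem.Str.lower iq.1) = 0 from by simp [pvFC, h1, h2, h3, h4]]
      ring

-- ===== VERDICT (by name: the statement is the Claim_ definition above) =====
theorem estimate_impacts_spec : Claim_equal_estimate_impacts := by
  intro items _
  unfold Spec_estimate_impacts
  rw [pvA_char, pvB_char, pvSP_decomp, pvSC_decomp]
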